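-- pv_equiv track=rewrite | github.com/NikodemWojtczak/telekomuna | file_handler.py | print_binary_string
-- ===== SOURCE A (Python) =====
-- def print_binary_string(binary_string):  # do czytelnego zapisu w pliku
--     result = ""
--     while binary_string:
--         result += binary_string[:8]
--         binary_string = binary_string[8:]
--         if len(binary_string) >= 8:
--             result += " "
--     return result
-- ===== SOURCE B (Python) =====
-- def print_binary_string(binary_string):  # do czytelnego zapisu w pliku
--     q = len(binary_string) // 8
--     return " ".join(binary_string[8 * i:8 * i + 8] for i in range(q)) + binary_string[8 * q:]
-- ===== Notes on version B (the rewrite author's own statement) =====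
-- stated objective: faster
-- what changed: Replaces the eat-8-and-decide-per-step while loop (repeated slicing and string concatenation) with one grouped join of the q full 8-char chunks plus the directly appended short tail (which A glues to the last chunk without a space).
import Mathlib
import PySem

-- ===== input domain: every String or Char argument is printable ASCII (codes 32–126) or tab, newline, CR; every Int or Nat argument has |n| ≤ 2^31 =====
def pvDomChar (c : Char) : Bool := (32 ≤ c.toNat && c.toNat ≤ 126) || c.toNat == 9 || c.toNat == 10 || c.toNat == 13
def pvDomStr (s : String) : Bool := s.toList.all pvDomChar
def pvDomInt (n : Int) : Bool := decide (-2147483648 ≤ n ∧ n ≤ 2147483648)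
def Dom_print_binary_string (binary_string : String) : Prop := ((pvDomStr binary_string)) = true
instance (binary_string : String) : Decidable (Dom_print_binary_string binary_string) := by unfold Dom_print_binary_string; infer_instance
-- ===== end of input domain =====

-- B replaces A's eat-8-chars-and-decide-per-step while loop by one grouped join of the
-- full 8-char chunks plus the directly appended short tail (objective: faster — A concatenates and re-slices repeatedly).

-- ===== PORT A =====
-- while binary_string: result += binary_string[:8]; binary_string = binary_string[8:];
--   if len(binary_string) >= 8: result += " "
def pbsLoop (bs result : List Char) : List Char :=
  if _h : bs = [] then result
  else
    let r1 := result ++ PySem.List.slice bs none (some 8)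
    let bs' := PySem.List.slice bs (some 8) none
    let r2 := if 8 ≤ PySem.List.len bs' then r1 ++ [' '] else r1
    pbsLoop bs' r2
termination_by bs.length
decreasing_by
  have h0 : 0 < bs.length := List.length_pos_iff.mpr _h
  rw [PySem.List.slice_from bs (show (0:Int) ≤ 8 by norm_num)]
  simp only [List.length_drop]
  omega

def print_binary_string (binary_string : String) : String :=
  String.ofList (pbsLoop binary_string.toList [])

-- ===== PORT B =====
-- q = len(s) // 8; return " ".join(s[8*i:8*i+8] for i in range(q)) + s[8*q:]
def print_binary_string_alt (binary_string : String) : String :=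
  let cs := binary_string.toList
  let q : Int := PySem.Int.floordiv (PySem.List.len cs) 8
  String.ofList
    (PySem.Chars.join [' ']
        ((PySem.List.pyRange 0 q 1).map
          (fun i => PySem.List.slice cs (some (8 * i)) (some (8 * i + 8))))
      ++ PySem.List.slice cs (some (8 * q)) none)

-- ===== PRECONDITION & SPEC =====
def Spec_print_binary_string (binary_string : String) (out : String) : Prop := out = print_binary_string_alt binary_string
instance (binary_string : String) (out : String) : Decidable (Spec_print_binary_string binary_string out) := by unfold Spec_print_binary_string; infer_instance

-- ===== CLAIM (what is proved, stated in full; the proofs are below) =====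
def Claim_equal_print_binary_string : Prop := ∀ (binary_string : String), Dom_print_binary_string binary_string → Spec_print_binary_string binary_string (print_binary_string binary_string)

-- ===== LEMMAS AND PROOFS =====

-- Nat-level reading of B's body, used only by the proofs.
def chunksN (cs : List Char) (q : Nat) : List (List Char) :=
  (List.range q).map (fun k => (cs.drop (8 * k)).take 8)

def coreN (cs : List Char) : List Char :=
  PySem.Chars.join [' '] (chunksN cs (cs.length / 8)) ++ cs.drop (8 * (cs.length / 8))

lemma alt_eq_coreN (s : String) :
    print_binary_string_alt s = String.ofList (coreN s.toList) := by
  have hq : PySem.Int.floordiv ((s.toList.length : Int)) 8 = ((s.toList.length / 8 : Nat) : Int) := by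
    exact_mod_cast PySem.Int.floordiv_natCast s.toList.length 8
  unfold print_binary_string_alt coreN chunksN
  simp only [PySem.List.len_eq]
  rw [hq]
  simp only [PySem.List.pyRange_one]
  congr 2
  · rw [show (((s.toList.length / 8 : Nat) : Int) - 0).toNat = s.toList.length / 8 by omega,
      List.map_map]
    congr 1
    apply List.map_congr_left
    intro k _
    simp only [Function.comp_apply]
    rw [show (8 * ((0:Int) + (k : Int))) = ((8 * k : Nat) : Int) by push_cast; ring,
      show ((8 * k : Nat) : Int) + 8 = ((8 * k : Nat) : Int) + ((8 : Nat) : Int) by norm_num]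
    exact PySem.List.slice_natCast_add _ _ _
  · rw [show (8 * ((s.toList.length / 8 : Nat) : Int)) = ((8 * (s.toList.length / 8) : Nat) : Int) by
      push_cast; ring]
    exact PySem.List.slice_from_natCast _ _

lemma coreN_small (cs : List Char) (h : cs.length ≤ 8) : coreN cs = cs := by
  unfold coreN chunksN
  rcases Nat.lt_or_ge cs.length 8 with hlt | hge
  · rw [show cs.length / 8 = 0 by omega]
    simp [PySem.Chars.join_nil]
  · have h8 : cs.length = 8 := by omega
    rw [show cs.length / 8 = 1 by omega]
    simp [List.range_one, PySem.Chars.join_singleton, List.take_of_length_le (by omega : cs.length ≤ 8),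
      List.drop_of_length_le (by omega : cs.length ≤ 8 * 1)]

lemma chunksN_succ (cs : List Char) (q : Nat) :
    chunksN cs (q + 1) = cs.take 8 :: chunksN (cs.drop 8) q := by
  unfold chunksN
  rw [List.range_succ_eq_map, List.map_cons, List.map_map]
  simp only [Nat.mul_zero, List.drop_zero]
  congr 1
  apply List.map_congr_left
  intro k _
  show (cs.drop (8 * (k + 1))).take 8 = _
  rw [List.drop_drop, show 8 + 8 * k = 8 * (k + 1) by ring]

lemma coreN_step (cs : List Char) (h : 8 < cs.length) :
    coreN cs = cs.take 8 ++ (if 8 ≤ (cs.drop 8).length then [' '] else []) ++ coreN (cs.drop 8) := by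
  have hq : cs.length / 8 = (cs.length - 8) / 8 + 1 := by omega
  have hd : (cs.drop 8).length = cs.length - 8 := by simp
  rw [show coreN cs = PySem.Chars.join [' '] (chunksN cs (cs.length / 8)) ++ cs.drop (8 * (cs.length / 8)) from rfl,
    hq, chunksN_succ]
  have hdrop : cs.drop (8 * ((cs.length - 8) / 8 + 1)) = (cs.drop 8).drop (8 * ((cs.length - 8) / 8)) := by
    rw [List.drop_drop, show 8 + 8 * ((cs.length - 8) / 8) = 8 * ((cs.length - 8) / 8 + 1) by ring]
  rw [hdrop]
  rcases Nat.eq_zero_or_pos ((cs.length - 8) / 8) with h0 | hpos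
  · have hlen : cs.length - 8 < 8 := by omega
    rw [h0]
    rw [show chunksN (cs.drop 8) 0 = [] from rfl, PySem.Chars.join_singleton]
    rw [if_neg (by omega), coreN_small (cs.drop 8) (by omega)]
    simp
  · obtain ⟨m, hm⟩ : ∃ m, (cs.length - 8) / 8 = m + 1 := ⟨(cs.length - 8) / 8 - 1, by omega⟩
    have hge : 8 ≤ (cs.drop 8).length := by
      rw [hd]; omega
    rw [if_pos hge, hm, chunksN_succ, PySem.Chars.join_cons_cons]
    rw [show coreN (cs.drop 8) = PySem.Chars.join [' '] (chunksN (cs.drop 8) ((cs.drop 8).length / 8)) ++ (cs.drop 8).drop (8 * ((cs.drop 8).length / 8)) from rfl]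
    rw [hd, hm, chunksN_succ]
    simp [List.append_assoc]

lemma pbsLoop_eq (fuel : Nat) : ∀ (cs acc : List Char), cs.length ≤ fuel →
    pbsLoop cs acc = acc ++ coreN cs := by
  induction fuel with
  | zero =>
    intro cs acc hle
    have : cs = [] := List.eq_nil_of_length_eq_zero (by omega)
    subst this
    rw [pbsLoop.eq_def, coreN_small [] (by simp)]
    simp
  | succ n ih =>
    intro cs acc hle
    by_cases h : cs = []
    · subst h
      rw [pbsLoop.eq_def, coreN_small [] (by simp)]
      simp
    · rw [pbsLoop.eq_def]
      simp only [h, dif_neg, not_false_iff]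
      have hslice_to : PySem.List.slice cs none (some 8) = cs.take 8 := by
        rw [PySem.List.slice_to cs (show (0:Int) ≤ 8 by norm_num)]; rfl
      have hslice_from : PySem.List.slice cs (some 8) none = cs.drop 8 := by
        rw [PySem.List.slice_from cs (show (0:Int) ≤ 8 by norm_num)]; rfl
      have h0 : 0 < cs.length := List.length_pos_iff.mpr h
      rw [hslice_to, hslice_from, ih (cs.drop 8) _ (by simp; omega)]
      rcases Nat.lt_or_ge 8 cs.length with hgt | hle8
      · rw [coreN_step cs hgt]
        have hlen : PySem.List.len (cs.drop 8) = ((cs.drop 8).length : Int) := PySem.List.len_eq _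
        by_cases hc : 8 ≤ (cs.drop 8).length
        · rw [if_pos (show (8:Int) ≤ PySem.List.len (cs.drop 8) by rw [hlen]; exact_mod_cast hc), if_pos hc]
          simp
        · rw [if_neg (show ¬ (8:Int) ≤ PySem.List.len (cs.drop 8) by rw [hlen]; exact_mod_cast hc), if_neg hc]
          simp
      · have hdrop : cs.drop 8 = [] := List.drop_eq_nil_of_le hle8
        rw [hdrop, coreN_small cs hle8, coreN_small [] (by simp)]
        rw [if_neg (by simp [PySem.List.len_eq])]
        rw [List.take_of_length_le hle8]
        simp

-- ===== VERDICT (by name: the statement is the Claim_ definition above) =====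
theorem print_binary_string_spec : Claim_equal_print_binary_string := by
  intro s _
  unfold Spec_print_binary_string print_binary_string
  rw [pbsLoop_eq s.toList.length s.toList [] (le_refl _), alt_eq_coreN]
  rfl
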